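-- pv_equiv track=rewrite | github.com/MouraJC/ERMandBAgen | NetsciHomework1.py | BSFqueue
-- ===== SOURCE A (Python) =====
-- def BSFqueue(tocompare,full):
--     queue = []
--     queue.append(tocompare[0])
--     queue.append(tocompare[1])
--     i =0
--     algo = []
--     algo=full.copy()
--     while i < len(queue):
--         index=0
--         n=0
--         while n < len(algo):
--             if queue[i] == algo[n][0] or queue[i] == algo[n][1]:
--                 full.pop(index)
--                 index -=1
--                 appendable=True
--                 if queue[i] == algo[n][0]:
--                     toapp=algo[n][1]
--                 else:
--                     toapp=algo[n][0]
--                 for a in queue: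
--                     if a == toapp:
--                         appendable=False
--                 if appendable==True:
--                     queue.append(toapp)
--             n+=1
--             index +=1
--         algo=full.copy()
--         i+=1
--     return(full,len(queue))
-- ===== SOURCE B (Python) =====
-- def BSFqueue(tocompare, full):
--     adj = {}
--     for e in full:
--         adj.setdefault(e[0], []).append(e[1])
--         adj.setdefault(e[1], []).append(e[0])
--     visited = []
--     seen = set()
--     for s in tocompare[:2]:
--         if s not in seen:
--             seen.add(s)
--             visited.append(s)
--     head = 0
--     while head < len(visited):
--         for w in adj.get(visited[head], []):
--             if w not in seen:
--                 seen.add(w)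
--                 visited.append(w)
--         head += 1
--     remaining = [e for e in full if e[0] not in seen and e[1] not in seen]
--     return (remaining, len(visited))
-- ===== Notes on version B (the rewrite author's own statement) =====
-- stated objective: alternative
-- what changed: Replaces A's repeated rescans of the shrinking edge list (with linear queue-membership scans inside) by a one-pass adjacency-dict build, a visited-set BFS over that index, and a single filtering pass over the edges; same results, different traversal machinery.
-- intended difference: When the two start vertices are equal (tocompare[0] == tocompare[1]), A seeds its queue with a duplicate and returns a reached-node count one too high (the shared start counted twice) while B counts every reached node once, which is the intended reading; the returned edge lists agree there. — e.g. on BSFqueue([5, 5], [[5, 6], [7, 8]]): A returns ([[7, 8]], 3), B returns ([[7, 8]], 2)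
import Mathlib
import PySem

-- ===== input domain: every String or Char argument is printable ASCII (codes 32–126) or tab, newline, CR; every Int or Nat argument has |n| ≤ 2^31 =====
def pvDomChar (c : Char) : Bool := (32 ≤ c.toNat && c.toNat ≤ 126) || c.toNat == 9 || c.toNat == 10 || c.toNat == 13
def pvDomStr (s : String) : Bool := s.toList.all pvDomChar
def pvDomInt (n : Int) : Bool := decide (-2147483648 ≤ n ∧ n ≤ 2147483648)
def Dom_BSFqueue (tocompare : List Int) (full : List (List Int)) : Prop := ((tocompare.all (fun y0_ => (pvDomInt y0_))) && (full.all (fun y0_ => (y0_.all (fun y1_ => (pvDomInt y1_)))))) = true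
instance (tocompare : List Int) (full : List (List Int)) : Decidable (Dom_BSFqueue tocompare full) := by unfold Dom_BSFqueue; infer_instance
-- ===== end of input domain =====

-- B replaces A's repeated rescans of the shrinking edge list by a single adjacency-indexed BFS plus
-- one filtering pass (objective: alternative algorithm, similar measured cost). A mutates `full` in
-- place (B does not); the equivalence proved here is about the RETURN value only.

-- ===== PORT A =====
-- e[0] / e[1] of an edge; total under Pre_ (every edge has length ≥ 2)
def pvE0 (e : List Int) : Int := PySem.List.pyGetD e 0 0
def pvE1 (e : List Int) : Int := PySem.List.pyGetD e 1 0

-- `appendable` flag: for a in queue: if a == toapp: appendable = False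
def pvAppendable (queue : List Int) (toapp : Int) : Bool :=
  queue.foldl (fun acc a => if a = toapp then false else acc) true

-- inner `while n < len(algo)` loop: state (full, index, queue), one step per element of algo
def pvInnerA (q : Int) (algo : List (List Int)) (full : List (List Int)) (index : Int)
    (queue : List Int) : List (List Int) × List Int :=
  match algo with
  | [] => (full, queue)
  | e :: rest =>
    if q = pvE0 e ∨ q = pvE1 e then
      let full' := ((PySem.List.pop? full index).map (·.2)).getD full
      let index' := index - 1
      let toapp := if q = pvE0 e then pvE1 e else pvE0 e
      let queue' := if pvAppendable queue toapp then queue ++ [toapp] else queue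
      pvInnerA q rest full' (index' + 1) queue'
    else
      pvInnerA q rest full (index + 1) queue

-- outer `while i < len(queue)` loop; fuel only guarantees termination (never exhausted: the queue
-- grows by at most one element per edge removed from full)
def pvOuterA (fuel : Nat) (queue : List Int) (full : List (List Int)) (i : Nat) :
    List (List Int) × Int :=
  match fuel with
  | 0 => (full, (queue.length : Int))
  | fuel + 1 =>
    if i < queue.length then
      let q := PySem.List.pyGetD queue (i : Int) 0
      let p := pvInnerA q full full 0 queue
      pvOuterA fuel p.2 p.1 (i + 1)
    else (full, (queue.length : Int))

def BSFqueue (tocompare : List Int) (full : List (List Int)) : List (List Int) × Int :=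
  let queue := [PySem.List.pyGetD tocompare 0 0, PySem.List.pyGetD tocompare 1 0]
  pvOuterA (2 * full.length + 3) queue full 0

-- ===== PORT B =====
-- adj.setdefault(e[0], []).append(e[1]);  adj.setdefault(e[1], []).append(e[0])
def pvAdj (full : List (List Int)) : PySem.Dict Int (List Int) :=
  full.foldl
    (fun d e =>
      let d1 := PySem.Dict.modify d (pvE0 e) [] (fun l => l ++ [pvE1 e])
      PySem.Dict.modify d1 (pvE1 e) [] (fun l => l ++ [pvE0 e]))
    PySem.Dict.empty

-- `if x not in seen: seen.add(x); visited.append(x)` over a list (used for the seed and the neighbours)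
def pvVisit (ws : List Int) (vis : List Int) (seen : PySem.Set Int) : List Int × PySem.Set Int :=
  match ws with
  | [] => (vis, seen)
  | w :: ws =>
    if PySem.Set.contains seen w then pvVisit ws vis seen
    else pvVisit ws (vis ++ [w]) (PySem.Set.add seen w)

-- `while head < len(visited)` BFS loop; fuel only guarantees termination (never exhausted)
def pvLoopB (adj : PySem.Dict Int (List Int)) (fuel : Nat) (vis : List Int)
    (seen : PySem.Set Int) (head : Nat) : List Int × PySem.Set Int :=
  match fuel with
  | 0 => (vis, seen)
  | fuel + 1 =>
    if head < vis.length then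
      let p := pvVisit (PySem.Dict.getD adj (PySem.List.pyGetD vis (head : Int) 0) []) vis seen
      pvLoopB adj fuel p.1 p.2 (head + 1)
    else (vis, seen)

def BSFqueue_alt (tocompare : List Int) (full : List (List Int)) : List (List Int) × Int :=
  let adj := pvAdj full
  let p0 := pvVisit (PySem.List.slice tocompare none (some 2)) [] PySem.Set.empty
  let p := pvLoopB adj (2 * full.length + 3) p0.1 p0.2 0
  (full.filter (fun e => !(PySem.Set.contains p.2 (pvE0 e)) && !(PySem.Set.contains p.2 (pvE1 e))),
   (p.1.length : Int))

-- ===== PRECONDITION & SPEC =====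
-- Pre_ excludes exactly the inputs where Python A raises IndexError: fewer than two start vertices,
-- or an edge with fewer than two entries.
def Pre_BSFqueue (tocompare : List Int) (full : List (List Int)) : Prop :=
  2 ≤ tocompare.length ∧ ∀ e ∈ full, 2 ≤ e.length
instance (tocompare : List Int) (full : List (List Int)) : Decidable (Pre_BSFqueue tocompare full) := by
  unfold Pre_BSFqueue; infer_instance

def pvWitness_BSFqueue : List Int × List (List Int) := ([0, 1], [[1, 2], [3, 4]])

-- When the two start vertices are equal, A seeds its queue with a duplicate and returns a node count
-- one too high (the common start is counted twice), while B counts each reached node once, the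
-- intended reading of "number of reached nodes"; the surviving-edge lists agree.
def D_BSFqueue (tocompare : List Int) (full : List (List Int)) : Prop :=
  2 ≤ tocompare.length ∧ tocompare.getD 0 0 = tocompare.getD 1 0
instance (tocompare : List Int) (full : List (List Int)) : Decidable (D_BSFqueue tocompare full) := by
  unfold D_BSFqueue; infer_instance

def Spec_BSFqueue (tocompare : List Int) (full : List (List Int)) (out : List (List Int) × Int) : Prop :=
  ¬ D_BSFqueue tocompare full → out = BSFqueue_alt tocompare full
instance (tocompare : List Int) (full : List (List Int)) (out : List (List Int) × Int) : Decidable (Spec_BSFqueue tocompare full out) := by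
  unfold Spec_BSFqueue; infer_instance

def pvDiffWitness_BSFqueue : List Int × List (List Int) := ([5, 5], [[5, 6], [7, 8]])
def pvDiffWitnessOut_BSFqueue : (List (List Int) × Int) × (List (List Int) × Int) :=
  (([[7, 8]], 3), ([[7, 8]], 2))

-- ===== CLAIM (what is proved, stated in full; the proofs are below) =====
def Claim_unchanged_BSFqueue : Prop := ∀ (tocompare : List Int) (full : List (List Int)), Dom_BSFqueue tocompare full → Pre_BSFqueue tocompare full → Spec_BSFqueue tocompare full (BSFqueue tocompare full)
def Claim_changed_BSFqueue : Prop := Dom_BSFqueue (pvDiffWitness_BSFqueue.1) (pvDiffWitness_BSFqueue.2) ∧ Pre_BSFqueue (pvDiffWitness_BSFqueue.1) (pvDiffWitness_BSFqueue.2) ∧ D_BSFqueue (pvDiffWitness_BSFqueue.1) (pvDiffWitness_BSFqueue.2) ∧ BSFqueue (pvDiffWitness_BSFqueue.1) (pvDiffWitness_BSFqueue.2) = pvDiffWitnessOut_BSFqueue.1 ∧ BSFqueue_alt (pvDiffWitness_BSFqueue.1) (pvDiffWitness_BSFqueue.2) = pvDiffWitnessOut_BSFqueue.2 ∧ pvDiffWitnessOut_BSFqueue.1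 ≠ pvDiffWitnessOut_BSFqueue.2
def Claim_exact_BSFqueue : Prop := ∀ (tocompare : List Int) (full : List (List Int)), Dom_BSFqueue tocompare full → Pre_BSFqueue tocompare full → D_BSFqueue tocompare full → BSFqueue tocompare full ≠ BSFqueue_alt tocompare full

-- ===== LEMMAS AND PROOFS =====

-- proof-side vocabulary ------------------------------------------------------

-- "edge e touches node v" (A's inner-loop test)
def pvTch (v : Int) (e : List Int) : Bool := decide (v = pvE0 e) || decide (v = pvE1 e)

-- "edge e touches some node of P"
def pvInc (P : List Int) (e : List Int) : Bool := decide (pvE0 e ∈ P) || decide (pvE1 e ∈ P)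

-- edges of full untouched by P
def pvFilt (P : List Int) (full : List (List Int)) : List (List Int) :=
  full.filter (fun e => !pvInc P e)

-- A's inner loop, stripped of the pop/index bookkeeping: the queue it builds
def pvAfoldQ (v : Int) (algo : List (List Int)) (q : List Int) : List Int :=
  match algo with
  | [] => q
  | e :: rest =>
    if v = pvE0 e ∨ v = pvE1 e then
      let toapp := if v = pvE0 e then pvE1 e else pvE0 e
      pvAfoldQ v rest (if pvAppendable q toapp then q ++ [toapp] else q)
    else pvAfoldQ v rest q

-- the adjacency entries B records for v, edge by edge
def pvAdjList (v : Int) (full : List (List Int)) : List Int :=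
  match full with
  | [] => []
  | e :: rest =>
    ((if pvE0 e = v then [pvE1 e] else []) ++ (if pvE1 e = v then [pvE0 e] else []))
      ++ pvAdjList v rest

-- B's visit step on a single ordered list (seen collapsed onto visited)
def pvGrow (ws : List Int) (vis : List Int) : List Int :=
  match ws with
  | [] => vis
  | w :: ws => if w ∈ vis then pvGrow ws vis else pvGrow ws (vis ++ [w])

-- B's BFS loop on that single list
def pvLoopG (full0 : List (List Int)) (fuel : Nat) (vis : List Int) (head : Nat) : List Int :=
  match fuel with
  | 0 => vis
  | fuel + 1 =>
    if head < vis.length then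
      pvLoopG full0 fuel (pvGrow (pvAdjList (vis.getD head 0) full0) vis) (head + 1)
    else vis

-- basic facts ----------------------------------------------------------------

theorem pvAppendable_eq (q : List Int) (t : Int) :
    pvAppendable q t = !decide (t ∈ q) := by
  have key : ∀ (q : List Int) (acc : Bool),
      q.foldl (fun acc a => if a = t then false else acc) acc = (acc && !decide (t ∈ q)) := by
    intro q
    induction q with
    | nil => simp
    | cons x q ih =>
      intro acc
      rw [List.foldl_cons]
      by_cases h : x = t
      · subst h; rw [if_pos rfl, ih]; simp
      · rw [if_neg h, ih]
        simp [List.mem_cons, show t ≠ x from fun hh => h hh.symm]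
  unfold pvAppendable
  rw [key q true]
  simp

theorem pvGrow_append (a b vis : List Int) :
    pvGrow (a ++ b) vis = pvGrow b (pvGrow a vis) := by
  induction a generalizing vis with
  | nil => rfl
  | cons x a ih =>
    by_cases h : x ∈ vis <;> simp [pvGrow, h, ih]

theorem pvGrow_prefix (ws vis : List Int) : vis <+: pvGrow ws vis := by
  induction ws generalizing vis with
  | nil => exact List.prefix_refl vis
  | cons w ws ih =>
    by_cases h : w ∈ vis
    · simpa [pvGrow, h] using ih vis
    · simp only [pvGrow, h, if_neg]
      exact List.IsPrefix.trans (List.prefix_append vis [w]) (ih (vis ++ [w]))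

theorem pvGrow_nodup (ws vis : List Int) (h : vis.Nodup) : (pvGrow ws vis).Nodup := by
  induction ws generalizing vis with
  | nil => exact h
  | cons w ws ih =>
    by_cases hw : w ∈ vis
    · simpa [pvGrow, hw] using ih vis h
    · simp only [pvGrow, hw, if_neg]
      refine ih (vis ++ [w]) ?_
      rw [List.nodup_append]
      refine ⟨h, List.nodup_singleton w, ?_⟩
      intro a ha b hb heq
      rw [List.mem_singleton] at hb
      subst hb
      exact hw (heq ▸ ha)

theorem pvGrow_singleton_mem (vis : List Int) {w : Int} (h : w ∈ vis) :
    pvGrow [w] vis = vis := by simp [pvGrow, h]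

theorem pvLoopG_done (full0 : List (List Int)) (fuel : Nat) (vis : List Int) (head : Nat)
    (h : vis.length ≤ head) : pvLoopG full0 fuel vis head = vis := by
  cases fuel with
  | zero => rfl
  | succ fuel => simp [pvLoopG, Nat.not_lt.mpr h]

theorem pvFilt_nil (full : List (List Int)) : pvFilt [] full = full := by
  simp [pvFilt, pvInc]

theorem pvFilt_filter (P : List Int) (v : Int) (full : List (List Int)) :
    (pvFilt P full).filter (fun e => !pvTch v e) = pvFilt (P ++ [v]) full := by
  unfold pvFilt
  rw [List.filter_filter]
  apply List.filter_congr
  intro e _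
  by_cases h0 : pvE0 e ∈ P <;> by_cases h1 : pvE1 e ∈ P <;>
    by_cases g0 : v = pvE0 e <;> by_cases g1 : v = pvE1 e <;>
      simp [pvTch, pvInc, h0, h1, g0, g1, eq_comm]

-- the pop/index bookkeeping of A's inner loop just deletes the touched edges in place
theorem pvInnerA_eq (v : Int) :
    ∀ (algo pre q : _), pvInnerA v algo (pre ++ algo) (pre.length : Int) q
      = (pre ++ algo.filter (fun e => !pvTch v e), pvAfoldQ v algo q) := by
  intro algo
  induction algo with
  | nil => intro pre q; simp [pvInnerA, pvAfoldQ]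
  | cons e rest ih =>
    intro pre q
    by_cases h : v = pvE0 e ∨ v = pvE1 e
    · simp only [pvInnerA, pvAfoldQ, h, if_pos]
      rw [PySem.List.pop?_natCast (pre ++ e :: rest) pre.length (by simp)]
      have he : (pre ++ e :: rest).eraseIdx pre.length = pre ++ rest := by
        simp [List.eraseIdx_append_of_length_le]
      have hi : (pre.length : Int) - 1 + 1 = (pre.length : Int) := by omega
      simp only [Option.map_some, Option.getD_some, he, hi]
      rw [ih pre, List.filter_cons_of_neg (by simp [pvTch]; tauto)]
    · simp only [pvInnerA, pvAfoldQ, h, if_neg, not_false_iff]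
      have hi : (pre.length : Int) + 1 = ((pre ++ [e]).length : Int) := by simp
      rw [hi]
      have := ih (pre ++ [e]) q
      rw [List.append_assoc] at this
      simp only [List.singleton_append] at this
      rw [this]
      have hne : pvTch v e = false := by simp [pvTch, h]; tauto
      simp [hne]

theorem pvInnerA_noop (v : Int) :
    ∀ (algo : List (List Int)) (full : List (List Int)) (idx : Int) (q : List Int),
      (∀ e ∈ algo, ¬(v = pvE0 e ∨ v = pvE1 e)) →
      pvInnerA v algo full idx q = (full, q) := by
  intro algo
  induction algo with
  | nil => intro full idx q _; rfl
  | cons e rest ih =>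
    intro full idx q h
    have he := h e (by simp)
    simp only [pvInnerA, he, if_neg, not_false_iff]
    exact ih full (idx + 1) q (fun e' he' => h e' (by simp [he']))

-- B's dict really is the per-node adjacency list
theorem pvAdj_getD (v : Int) :
    ∀ (L : List (List Int)) (d : PySem.Dict Int (List Int)),
      PySem.Dict.getD
        (L.foldl (fun d e =>
            let d1 := PySem.Dict.modify d (pvE0 e) [] (fun l => l ++ [pvE1 e])
            PySem.Dict.modify d1 (pvE1 e) [] (fun l => l ++ [pvE0 e])) d) v []
        = PySem.Dict.getD d v [] ++ pvAdjList v L := by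
  intro L
  induction L with
  | nil => intro d; simp [pvAdjList]
  | cons e rest ih =>
    intro d
    rw [List.foldl_cons, ih]
    have hstep :
        PySem.Dict.getD
          (PySem.Dict.modify (PySem.Dict.modify d (pvE0 e) [] (fun l => l ++ [pvE1 e]))
            (pvE1 e) [] (fun l => l ++ [pvE0 e])) v []
        = PySem.Dict.getD d v []
            ++ ((if pvE0 e = v then [pvE1 e] else []) ++ (if pvE1 e = v then [pvE0 e] else [])) := by
      by_cases h0 : pvE0 e = v <;> by_cases h1 : pvE1 e = v
      · rw [h0, h1, PySem.Dict.getD_modify_self, PySem.Dict.getD_modify_self]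
        simp
      · rw [PySem.Dict.getD_modify_of_ne _ _ _ (fun hh => h1 hh.symm), h0,
          PySem.Dict.getD_modify_self]
        simp [h0, h1]
      · rw [h1, PySem.Dict.getD_modify_self,
          PySem.Dict.getD_modify_of_ne _ _ _ (fun hh => h0 hh.symm)]
        simp [h0, h1]
      · rw [PySem.Dict.getD_modify_of_ne _ _ _ (fun hh => h1 hh.symm),
          PySem.Dict.getD_modify_of_ne _ _ _ (fun hh => h0 hh.symm)]
        simp [h0, h1]
    rw [hstep, pvAdjList, List.append_assoc]

theorem pvAdj_getD' (v : Int) (full : List (List Int)) :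
    PySem.Dict.getD (pvAdj full) v [] = pvAdjList v full := by
  have := pvAdj_getD v full PySem.Dict.empty
  simpa [pvAdj] using this

-- visited and seen stay literally equal in B
theorem pvVisit_sync : ∀ (ws vis : List Int),
    pvVisit ws vis vis = (pvGrow ws vis, pvGrow ws vis) := by
  intro ws
  induction ws with
  | nil => intro vis; rfl
  | cons w ws ih =>
    intro vis
    by_cases h : w ∈ vis
    · have hc : PySem.Set.contains vis w = true := (PySem.Set.contains_iff vis w).mpr h
      simp [pvVisit, pvGrow, hc, h, ih]
    · have hc : PySem.Set.contains vis w = false := by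
        rw [Bool.eq_false_iff]
        exact fun hh => h ((PySem.Set.contains_iff vis w).mp hh)
      simp [pvVisit, pvGrow, hc, h, PySem.Set.add, ih]

theorem pvLoopB_sync (full0 : List (List Int)) :
    ∀ (fuel : Nat) (vis : List Int) (head : Nat),
      pvLoopB (pvAdj full0) fuel vis vis head
        = (pvLoopG full0 fuel vis head, pvLoopG full0 fuel vis head) := by
  intro fuel
  induction fuel with
  | zero => intro vis head; rfl
  | succ fuel ih =>
    intro vis head
    by_cases h : head < vis.length
    · simp only [pvLoopB, pvLoopG, h, if_pos]
      rw [show PySem.List.pyGetD vis (head : Int) 0 = vis.getD head 0 from by simp]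
      rw [pvAdj_getD', pvVisit_sync]
      exact ih _ _
    · simp [pvLoopB, pvLoopG, h]

theorem pvNodup_snoc {vis : List Int} {w : Int} (h : vis.Nodup) (hw : w ∉ vis) :
    (vis ++ [w]).Nodup := by
  rw [List.nodup_append]
  refine ⟨h, List.nodup_singleton w, ?_⟩
  intro a ha b hb heq
  rw [List.mem_singleton] at hb
  subst hb
  exact hw (heq ▸ ha)

theorem pvGrow_of_subset : ∀ (ws vis : List Int), (∀ w ∈ ws, w ∈ vis) → pvGrow ws vis = vis := by
  intro ws
  induction ws with
  | nil => intro vis _; rfl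
  | cons w ws ih =>
    intro vis h
    have hw : w ∈ vis := h w (by simp)
    simp only [pvGrow, hw, if_pos]
    exact ih vis (fun x hx => h x (by simp [hx]))

theorem pvFilt_cons_pos {P : List Int} {e : List Int} (L : List (List Int))
    (h : pvInc P e = false) : pvFilt P (e :: L) = e :: pvFilt P L := by
  simp [pvFilt, List.filter_cons, h]

theorem pvFilt_cons_neg {P : List Int} {e : List Int} (L : List (List Int))
    (h : pvInc P e = true) : pvFilt P (e :: L) = pvFilt P L := by
  simp [pvFilt, List.filter_cons, h]

theorem pvInc_snoc (P : List Int) (v : Int) (e : List Int) :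
    pvInc (P ++ [v]) e = (pvInc P e || pvTch v e) := by
  by_cases h0 : pvE0 e ∈ P <;> by_cases h1 : pvE1 e ∈ P <;>
    by_cases g0 : v = pvE0 e <;> by_cases g1 : v = pvE1 e <;>
      simp [pvInc, pvTch, h0, h1, g0, g1, eq_comm]

-- the heart of the equivalence: one node's processing appends the same new nodes in the same
-- order on both sides, and removes at least as many edges as nodes it appends
theorem pvCore (v : Int) (ex P : List Int) (hvP : v ∉ P) :
    ∀ (L : List (List Int)) (vis : List Int),
      (∀ x ∈ ex, x ∈ vis) → v ∈ vis → (∀ x ∈ P, x ∈ vis) → vis.Nodup →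
      pvAfoldQ v (pvFilt P L) (ex ++ vis) = ex ++ pvGrow (pvAdjList v L) vis
      ∧ (pvGrow (pvAdjList v L) vis).length + (pvFilt (P ++ [v]) L).length
          ≤ vis.length + (pvFilt P L).length := by
  intro L
  induction L with
  | nil =>
    intro vis _ _ _ _
    simp [pvFilt, pvAfoldQ, pvAdjList, pvGrow]
  | cons e L ih =>
    intro vis hex hv hP hnd
    have hmem_append : ∀ x : Int, x ∈ ex ++ vis ↔ x ∈ vis := by
      intro x
      simp only [List.mem_append]
      exact ⟨fun h => h.elim (fun hx => hex x hx) id, Or.inr⟩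
    by_cases hinc : pvInc P e = true
    · -- edge already removed by A (touches P); all its adj entries are already visited in B
      rw [pvFilt_cons_neg L hinc, pvFilt_cons_neg L (by rw [pvInc_snoc, hinc]; rfl)]
      simp only [pvInc, Bool.or_eq_true, decide_eq_true_eq] at hinc
      have hents : pvGrow ((if pvE0 e = v then [pvE1 e] else [])
          ++ (if pvE1 e = v then [pvE0 e] else [])) vis = vis := by
        apply pvGrow_of_subset
        intro w hw
        rcases List.mem_append.mp hw with hw | hw
        · by_cases g0 : pvE0 e = v
          · rw [if_pos g0, List.mem_singleton] at hw
            rcases hinc with h | h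
            · exact absurd (g0 ▸ h) hvP
            · exact hw ▸ hP _ h
          · rw [if_neg g0] at hw
            exact absurd hw (List.not_mem_nil)
        · by_cases g1 : pvE1 e = v
          · rw [if_pos g1, List.mem_singleton] at hw
            rcases hinc with h | h
            · exact hw ▸ hP _ h
            · exact absurd (g1 ▸ h) hvP
          · rw [if_neg g1] at hw
            exact absurd hw (List.not_mem_nil)
      rw [pvAdjList, pvGrow_append, hents]
      exact ih vis hex hv hP hnd
    · -- edge survives A's P-filter
      rw [Bool.not_eq_true] at hinc
      rw [pvFilt_cons_pos L hinc]
      by_cases htch : v = pvE0 e ∨ v = pvE1 e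
      · -- A processes it; B has matching adjacency entries
        have hfilt' : pvFilt (P ++ [v]) (e :: L) = pvFilt (P ++ [v]) L := by
          apply pvFilt_cons_neg
          rw [pvInc_snoc, hinc]
          simp only [pvTch, Bool.false_or, Bool.or_eq_true, decide_eq_true_eq]
          tauto
        rw [hfilt']
        by_cases g0 : v = pvE0 e
        · -- toapp = e1
          have htoapp : (if v = pvE0 e then pvE1 e else pvE0 e) = pvE1 e := if_pos g0
          have hents : pvAdjList v (e :: L)
              = (pvE1 e :: (if pvE1 e = v then [pvE0 e] else [])) ++ pvAdjList v L := by
            simp [pvAdjList, g0.symm]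
          by_cases gm : pvE1 e ∈ vis
          · -- neighbour already visited: neither side appends
            have happ : pvAppendable (ex ++ vis) (pvE1 e) = false := by
              rw [pvAppendable_eq]
              simp [hmem_append, gm]
            have hgrow : pvGrow (pvE1 e :: (if pvE1 e = v then [pvE0 e] else [])) vis = vis := by
              apply pvGrow_of_subset
              intro w hw
              rcases List.mem_cons.mp hw with hw | hw
              · exact hw ▸ gm
              · by_cases g1 : pvE1 e = v
                · rw [if_pos g1, List.mem_singleton] at hw
                  exact hw ▸ (g0 ▸ hv)
                · rw [if_neg g1] at hw
                  exact absurd hw (List.not_mem_nil)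
            have hstep : pvAfoldQ v (e :: pvFilt P L) (ex ++ vis)
                = pvAfoldQ v (pvFilt P L) (ex ++ vis) := by
              simp only [pvAfoldQ]
              rw [if_pos htch, htoapp, happ]
              simp
            rw [hstep, hents, pvGrow_append, hgrow]
            have hc := ih vis hex hv hP hnd
            refine ⟨hc.1, ?_⟩
            have := hc.2
            simp only [List.length_cons]
            omega
          · -- new neighbour: both sides append e1
            have g1 : pvE1 e ≠ v := fun hh => gm (hh ▸ hv)
            have happ : pvAppendable (ex ++ vis) (pvE1 e) = true := by
              rw [pvAppendable_eq]
              simp [hmem_append, gm]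
            have hgrow : pvGrow (pvE1 e :: (if pvE1 e = v then [pvE0 e] else [])) vis
                = vis ++ [pvE1 e] := by
              simp [pvGrow, g1, gm]
            have hstep : pvAfoldQ v (e :: pvFilt P L) (ex ++ vis)
                = pvAfoldQ v (pvFilt P L) (ex ++ (vis ++ [pvE1 e])) := by
              simp only [pvAfoldQ]
              rw [if_pos htch, htoapp, happ]
              simp
            rw [hstep, hents, pvGrow_append, hgrow]
            have hc := ih (vis ++ [pvE1 e])
              (fun x hx => List.mem_append_left _ (hex x hx))
              (List.mem_append_left _ hv)
              (fun x hx => List.mem_append_left _ (hP x hx))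
              (pvNodup_snoc hnd gm)
            refine ⟨hc.1, ?_⟩
            have := hc.2
            simp only [List.length_append, List.length_cons, List.length_nil] at *
            omega
        · -- v = e1 (and v ≠ e0): toapp = e0
          have g1 : v = pvE1 e := htch.resolve_left g0
          have htoapp : (if v = pvE0 e then pvE1 e else pvE0 e) = pvE0 e := if_neg g0
          have hents : pvAdjList v (e :: L) = [pvE0 e] ++ pvAdjList v L := by
            have h0 : ¬pvE0 e = v := fun hh => g0 hh.symm
            simp [pvAdjList, h0, g1.symm]
          by_cases gm : pvE0 e ∈ vis
          · have happ : pvAppendable (ex ++ vis) (pvE0 e) = false := by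
              rw [pvAppendable_eq]
              simp [hmem_append, gm]
            have hgrow : pvGrow [pvE0 e] vis = vis := pvGrow_singleton_mem vis gm
            have hstep : pvAfoldQ v (e :: pvFilt P L) (ex ++ vis)
                = pvAfoldQ v (pvFilt P L) (ex ++ vis) := by
              simp only [pvAfoldQ]
              rw [if_pos htch, htoapp, happ]
              simp
            rw [hstep, hents, pvGrow_append, hgrow]
            have hc := ih vis hex hv hP hnd
            refine ⟨hc.1, ?_⟩
            have := hc.2
            simp only [List.length_cons]
            omega
          · have happ : pvAppendable (ex ++ vis) (pvE0 e) = true := by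
              rw [pvAppendable_eq]
              simp [hmem_append, gm]
            have hgrow : pvGrow [pvE0 e] vis = vis ++ [pvE0 e] := by
              simp [pvGrow, gm]
            have hstep : pvAfoldQ v (e :: pvFilt P L) (ex ++ vis)
                = pvAfoldQ v (pvFilt P L) (ex ++ (vis ++ [pvE0 e])) := by
              simp only [pvAfoldQ]
              rw [if_pos htch, htoapp, happ]
              simp
            rw [hstep, hents, pvGrow_append, hgrow]
            have hc := ih (vis ++ [pvE0 e])
              (fun x hx => List.mem_append_left _ (hex x hx))
              (List.mem_append_left _ hv)
              (fun x hx => List.mem_append_left _ (hP x hx))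
              (pvNodup_snoc hnd gm)
            refine ⟨hc.1, ?_⟩
            have := hc.2
            simp only [List.length_append, List.length_cons, List.length_nil] at *
            omega
      · -- edge does not touch v: skipped on both sides
        have hents : pvAdjList v (e :: L) = pvAdjList v L := by
          have h0 : ¬pvE0 e = v := fun hh => htch (Or.inl hh.symm)
          have h1 : ¬pvE1 e = v := fun hh => htch (Or.inr hh.symm)
          simp [pvAdjList, h0, h1]
        have hfilt' : pvFilt (P ++ [v]) (e :: L) = e :: pvFilt (P ++ [v]) L := by
          apply pvFilt_cons_pos
          rw [pvInc_snoc, hinc]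
          simp only [pvTch, Bool.false_or, Bool.or_eq_false_iff, decide_eq_false_iff_not]
          tauto
        have hstep : pvAfoldQ v (e :: pvFilt P L) (ex ++ vis)
            = pvAfoldQ v (pvFilt P L) (ex ++ vis) := by
          simp only [pvAfoldQ]
          rw [if_neg htch]
        rw [hstep, hents, hfilt']
        have hc := ih vis hex hv hP hnd
        refine ⟨hc.1, ?_⟩
        have := hc.2
        simp only [List.length_cons]
        omega

-- master bisimulation: from aligned states, A's outer loop and B's BFS loop produce the same
-- surviving edges, and queues differing only by the fixed prefix ex
theorem pvMaster (full0 : List (List Int)) (ex : List Int) :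
    ∀ (fa fb : Nat) (vis : List Int) (head : Nat),
      head ≤ vis.length → vis.Nodup → (∀ x ∈ ex, x ∈ vis.take head) →
      vis.length - head + (pvFilt (vis.take head) full0).length + 1 ≤ fa →
      vis.length - head + (pvFilt (vis.take head) full0).length + 1 ≤ fb →
      pvOuterA fa (ex ++ vis) (pvFilt (vis.take head) full0) (ex.length + head)
        = (pvFilt (pvLoopG full0 fb vis head) full0,
           ((ex.length + (pvLoopG full0 fb vis head).length : Nat) : Int)) := by
  intro fa
  induction fa with
  | zero =>
    intro fb vis head _ _ _ hfa _
    omega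
  | succ fa ih =>
    intro fb vis head h1 h2 h3 hfa hfb
    by_cases hlt : head < vis.length
    · obtain ⟨fb', rfl⟩ : ∃ fb', fb = fb' + 1 := ⟨fb - 1, by omega⟩
      have hvEq : vis.getD head 0 = vis[head]'hlt := List.getD_eq_getElem vis 0 hlt
      set v := vis.getD head 0 with hvdef
      have hvelem : v ∈ vis := by rw [hvEq]; exact List.getElem_mem hlt
      have hvnot : v ∉ vis.take head := by
        intro hmem
        have hsplit := List.take_append_drop head vis
        have h2' : (vis.take head ++ vis.drop head).Nodup := by rw [hsplit]; exact h2
        rw [List.nodup_append] at h2'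
        have hdrop : v ∈ vis.drop head := by
          have hg : (vis.drop head)[0]'(by simp; omega) = vis[head]'hlt := by
            rw [List.getElem_drop]
            simp
          rw [hvEq, ← hg]
          exact List.getElem_mem _
        exact (h2'.2.2 v hmem v hdrop) rfl
      have hexvis : ∀ x ∈ ex, x ∈ vis := fun x hx => List.mem_of_mem_take (h3 x hx)
      have hPvis : ∀ x ∈ vis.take head, x ∈ vis := fun x hx => List.mem_of_mem_take hx
      have hcore := pvCore v ex (vis.take head) hvnot full0 vis hexvis hvelem hPvis h2
      -- unfold one step of A
      have hcond : ex.length + head < (ex ++ vis).length := by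
        simp only [List.length_append]; omega
      have hq : PySem.List.pyGetD (ex ++ vis) ((ex.length + head : Nat) : Int) 0 = v := by
        rw [hvdef]
        simp only [PySem.List.pyGetD_natCast]
        rw [List.getD_append_right _ _ _ _ (by omega)]
        congr 1
        omega
      have hinner := pvInnerA_eq v (pvFilt (vis.take head) full0) [] (ex ++ vis)
      simp only [List.nil_append, List.length_nil, Nat.cast_zero] at hinner
      have hstepA : pvOuterA (fa + 1) (ex ++ vis) (pvFilt (vis.take head) full0) (ex.length + head)
          = pvOuterA fa (pvAfoldQ v (pvFilt (vis.take head) full0) (ex ++ vis))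
              ((pvFilt (vis.take head) full0).filter (fun e => !pvTch v e))
              (ex.length + head + 1) := by
        simp only [pvOuterA]
        rw [if_pos hcond, hq, hinner]
      rw [hstepA, hcore.1, pvFilt_filter]
      -- the appended part and facts about the new visited list
      obtain ⟨Δ, hΔ⟩ := pvGrow_prefix (pvAdjList v full0) vis
      have hlen' : vis.length ≤ (pvGrow (pvAdjList v full0) vis).length := by
        rw [← hΔ]; simp
      have htake1 : (pvGrow (pvAdjList v full0) vis).take (head + 1) = vis.take head ++ [v] := by
        rw [← hΔ, List.take_append,
          show head + 1 - vis.length = 0 from by omega, List.take_zero, List.append_nil,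
          List.take_add_one]
        congr 1
        rw [List.getElem?_eq_getElem hlt, hvEq]
        rfl
      -- unfold one step of B
      have hstepB : pvLoopG full0 (fb' + 1) vis head
          = pvLoopG full0 fb' (pvGrow (pvAdjList v full0) vis) (head + 1) := by
        simp only [pvLoopG]
        rw [if_pos hlt]
      rw [hstepB]
      rw [show pvFilt (vis.take head ++ [v]) full0
          = pvFilt ((pvGrow (pvAdjList v full0) vis).take (head + 1)) full0 from by
        rw [htake1]]
      rw [show ex.length + head + 1 = ex.length + (head + 1) from by omega]
      exact ih fb' (pvGrow (pvAdjList v full0) vis) (head + 1) (by omega) (pvGrow_nodup _ _ h2)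
        (by
          rw [htake1]
          exact fun x hx => List.mem_append_left _ (h3 x hx))
        (by
          have hc2 := hcore.2
          rw [← htake1] at hc2
          omega)
        (by
          have hc2 := hcore.2
          rw [← htake1] at hc2
          omega)
    · have hge : vis.length ≤ head := Nat.not_lt.mp hlt
      have htk : vis.take head = vis := List.take_of_length_le hge
      have hcond : ¬(ex.length + head < (ex ++ vis).length) := by
        simp only [List.length_append]; omega
      have hA : pvOuterA (fa + 1) (ex ++ vis) (pvFilt (vis.take head) full0) (ex.length + head)
          = (pvFilt (vis.take head) full0, (((ex ++ vis).length : Nat) : Int)) := by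
        simp only [pvOuterA]
        rw [if_neg hcond]
      rw [hA, pvLoopG_done full0 fb vis head hge, htk]
      simp [List.length_append]

theorem pvOuterA_step (fuel : Nat) (queue : List Int) (full : List (List Int)) (i : Nat)
    (h : i < queue.length) :
    pvOuterA (fuel + 1) queue full i
      = pvOuterA fuel (pvInnerA (queue.getD i 0) full full 0 queue).2
          (pvInnerA (queue.getD i 0) full full 0 queue).1 (i + 1) := by
  simp only [pvOuterA]
  rw [if_pos h]
  simp

theorem pvLoopG_step (full0 : List (List Int)) (fuel : Nat) (vis : List Int) (head : Nat)
    (h : head < vis.length) :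
    pvLoopG full0 (fuel + 1) vis head
      = pvLoopG full0 fuel (pvGrow (pvAdjList (vis.getD head 0) full0) vis) (head + 1) := by
  simp only [pvLoopG]
  rw [if_pos h]

theorem pvContains_eq (G : List Int) (x : Int) :
    PySem.Set.contains G x = decide (x ∈ G) := by
  by_cases h : x ∈ G
  · rw [decide_eq_true h]
    exact (PySem.Set.contains_iff G x).mpr h
  · rw [decide_eq_false h, Bool.eq_false_iff]
    exact fun hh => h ((PySem.Set.contains_iff G x).mp hh)

theorem pvFilt_contains (G : List Int) (full : List (List Int)) :
    full.filter (fun e => !(PySem.Set.contains G (pvE0 e)) && !(PySem.Set.contains G (pvE1 e)))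
      = pvFilt G full := by
  unfold pvFilt
  apply List.filter_congr
  intro e _
  rw [pvContains_eq, pvContains_eq]
  simp [pvInc]

theorem pvAlt_eq (t0 t1 : Int) (rest : List Int) (full : List (List Int)) :
    BSFqueue_alt (t0 :: t1 :: rest) full
      = (pvFilt (pvLoopG full (2 * full.length + 3) (pvGrow [t0, t1] []) 0) full,
         ((pvLoopG full (2 * full.length + 3) (pvGrow [t0, t1] []) 0).length : Int)) := by
  have hslice : PySem.List.slice (t0 :: t1 :: rest) none (some 2) = [t0, t1] := rfl
  have hempty : (PySem.Set.empty : PySem.Set Int) = ([] : List Int) := rfl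
  simp only [BSFqueue_alt, hslice, hempty, pvVisit_sync, pvLoopB_sync, pvFilt_contains]

theorem pvFilt_step (t0 : Int) (full : List (List Int)) :
    full.filter (fun e => !pvTch t0 e) = pvFilt [t0] full := by
  have h := pvFilt_filter [] t0 full
  rw [pvFilt_nil] at h
  simpa using h

theorem BSFqueue_unfold (t0 t1 : Int) (rest : List Int) (full : List (List Int)) :
    BSFqueue (t0 :: t1 :: rest) full = pvOuterA (2 * full.length + 3) [t0, t1] full 0 := by
  simp only [BSFqueue, PySem.List.pyGetD_zero, PySem.List.pyGetD_ofNat', List.getD_cons_zero,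
    List.getD_cons_succ]

theorem BSFqueue_key : ∀ (tocompare : List Int) (full : List (List Int)),
    Pre_BSFqueue tocompare full →
    BSFqueue tocompare full =
      if tocompare.getD 0 0 = tocompare.getD 1 0 then
        ((BSFqueue_alt tocompare full).1, (BSFqueue_alt tocompare full).2 + 1)
      else BSFqueue_alt tocompare full := by
  intro toc full hPre
  obtain ⟨hlen, _hedges⟩ := hPre
  rcases toc with _ | ⟨t0, _ | ⟨t1, rest⟩⟩
  · simp at hlen
  · simp at hlen
  · have hget : ((t0 :: t1 :: rest).getD 0 0 = (t0 :: t1 :: rest).getD 1 0) ↔ (t0 = t1) := by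
      simp
    by_cases hd : t0 = t1
    · -- duplicate seed: A counts t0 twice
      subst hd
      rw [if_pos (by simp)]
      rw [pvAlt_eq, BSFqueue_unfold]
      have hseedg : pvGrow [t0, t0] [] = [t0] := by simp [pvGrow]
      rw [hseedg]
      -- unfold one step of B's loop
      have hB0 : pvLoopG full (2 * full.length + 3) [t0] 0
          = pvLoopG full (2 * full.length + 2) (pvGrow (pvAdjList t0 full) [t0]) 1 := by
        rw [show 2 * full.length + 3 = (2 * full.length + 2) + 1 from by omega,
          pvLoopG_step full _ _ _ (by simp)]
        rfl
      rw [hB0]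
      -- step 1 of A: process t0 against the whole edge list
      rw [show 2 * full.length + 3 = (2 * full.length + 2) + 1 from by omega,
        pvOuterA_step _ _ _ _ (by simp)]
      have hinner1 := pvInnerA_eq t0 full [] [t0, t0]
      simp only [List.nil_append, List.length_nil, Nat.cast_zero] at hinner1
      rw [show ([t0, t0] : List Int).getD 0 0 = t0 from rfl, hinner1]
      have hcore := pvCore t0 [t0] [] (by simp) full [t0] (by simp) (by simp) (by simp) (by simp)
      have hc1 := hcore.1
      rw [pvFilt_nil] at hc1
      simp only [List.cons_append, List.nil_append] at hc1
      have hc2 : (pvGrow (pvAdjList t0 full) [t0]).length + (pvFilt [t0] full).length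
          ≤ 1 + full.length := by
        have h := hcore.2
        rw [pvFilt_nil] at h
        exact h
      obtain ⟨D1, hD1⟩ := pvGrow_prefix (pvAdjList t0 full) [t0]
      have hV1len : 1 ≤ (pvGrow (pvAdjList t0 full) [t0]).length := by
        rw [← hD1]; simp
      simp only [hc1, pvFilt_step]
      -- step 2 of A: the duplicate t0 finds no incident edge left
      rw [show 2 * full.length + 2 = (2 * full.length + 1) + 1 from by omega,
        pvOuterA_step _ _ _ _ (by simp only [List.length_cons]; omega)]
      have hq2 : (t0 :: pvGrow (pvAdjList t0 full) [t0]).getD 1 0 = t0 := by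
        rw [← hD1]
        rfl
      have hnoop : pvInnerA t0 (pvFilt [t0] full) (pvFilt [t0] full) 0
          (t0 :: pvGrow (pvAdjList t0 full) [t0])
          = (pvFilt [t0] full, t0 :: pvGrow (pvAdjList t0 full) [t0]) := by
        apply pvInnerA_noop
        intro e he hor
        have hmem := (List.mem_filter.mp he).2
        simp only [pvInc, List.mem_singleton, Bool.or_eq_true, decide_eq_true_eq,
          Bool.not_eq_true', Bool.or_eq_false_iff, decide_eq_false_iff_not] at hmem
        rcases hor with h | h
        · exact hmem.1 h.symm
        · exact hmem.2 h.symm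
      rw [hq2, hnoop]
      -- align with the master lemma: ex = [t0], vis = V1, head = 1
      have htk1 : (pvGrow (pvAdjList t0 full) [t0]).take 1 = [t0] := by
        rw [← hD1]
        rfl
      have hnd1 : (pvGrow (pvAdjList t0 full) [t0]).Nodup :=
        pvGrow_nodup _ _ (List.nodup_singleton t0)

      have hm := pvMaster full [t0] (2 * full.length + 1) (2 * full.length + 2)
        (pvGrow (pvAdjList t0 full) [t0]) 1 hV1len hnd1
        (by rw [htk1]; exact fun x hx => hx)
        (by rw [htk1]; omega)
        (by rw [htk1]; omega)
      rw [htk1] at hm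
      simp only [List.singleton_append, List.length_singleton] at hm
      rw [hm]
      rw [Prod.ext_iff]
      exact ⟨rfl, by push_cast; ring⟩
    · -- distinct seeds: plain equivalence
      rw [if_neg (by simpa [hget] using hd)]
      rw [pvAlt_eq, BSFqueue_unfold]
      have hseedg : pvGrow [t0, t1] [] = [t0, t1] := by
        simp [pvGrow, show ¬t1 = t0 from fun h => hd h.symm]
      rw [hseedg]
      have hm := pvMaster full [] (2 * full.length + 3) (2 * full.length + 3) [t0, t1] 0
        (by simp) (by simp [hd]) (by simp)
        (by simp only [List.take_zero, pvFilt_nil, List.length_cons, List.length_nil]; omega)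
        (by simp only [List.take_zero, pvFilt_nil, List.length_cons, List.length_nil]; omega)
      simp only [List.nil_append, List.take_zero, pvFilt_nil, List.length_nil, Nat.zero_add,
        Nat.add_zero] at hm
      rw [hm]

-- ===== VERDICT (by name: the statement is the Claim_ definition above) =====
theorem BSFqueue_spec : Claim_unchanged_BSFqueue := by
  intro toc full _hD hPre hnD
  have h := BSFqueue_key toc full hPre
  rw [if_neg (fun h0 => hnD ⟨hPre.1, h0⟩)] at h
  exact h

theorem BSFqueue_changed : Claim_changed_BSFqueue := by
  unfold Claim_changed_BSFqueue; decide

theorem BSFqueue_tight : Claim_exact_BSFqueue := by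
  intro toc full _hD hPre hD
  have h := BSFqueue_key toc full hPre
  rw [if_pos hD.2] at h
  intro hEq
  rw [hEq] at h
  have := congrArg Prod.snd h
  simp at this
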